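-- pv_equiv track=rewrite | github.com/onlybin/six_beta | backtest.py | get_current_zodiac_map
-- ===== SOURCE A (Python) =====
-- def get_current_zodiac_map(ref_year):
--     zodiac_order = ['鼠', '牛', '虎', '兔', '龍', '蛇', '馬', '羊', '猴', '雞', '狗', '豬']
--     year = ref_year
--     base_year = 2020
--     current_zodiac_idx = (year - base_year) % 12
--     zodiac_map = {z: [] for z in zodiac_order}
--     for num in range(1, 50):
--         offset = (num - 1) % 12
--         z_idx = (current_zodiac_idx - offset) % 12
--         zodiac_map[zodiac_order[z_idx]].append(num)
--     return zodiac_map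
-- ===== SOURCE B (Python) =====
-- def get_current_zodiac_map(ref_year):
--     zodiac_order = ['鼠', '牛', '虎', '兔', '龍', '蛇', '馬', '羊', '猴', '雞', '狗', '豬']
--     current_zodiac_idx = (ref_year - 2020) % 12
--     return {zodiac_order[i]: list(range((current_zodiac_idx - i) % 12 + 1, 50, 12))
--             for i in range(12)}
-- ===== Notes on version B (the rewrite author's own statement) =====
-- stated objective: simpler
-- what changed: Instead of scattering each lottery number one at a time into per-sign lists via modular index arithmetic, B loops over the twelve signs and builds each sign's list directly as a stride-twelve arithmetic progression range in a dict comprehension.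
import Mathlib
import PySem

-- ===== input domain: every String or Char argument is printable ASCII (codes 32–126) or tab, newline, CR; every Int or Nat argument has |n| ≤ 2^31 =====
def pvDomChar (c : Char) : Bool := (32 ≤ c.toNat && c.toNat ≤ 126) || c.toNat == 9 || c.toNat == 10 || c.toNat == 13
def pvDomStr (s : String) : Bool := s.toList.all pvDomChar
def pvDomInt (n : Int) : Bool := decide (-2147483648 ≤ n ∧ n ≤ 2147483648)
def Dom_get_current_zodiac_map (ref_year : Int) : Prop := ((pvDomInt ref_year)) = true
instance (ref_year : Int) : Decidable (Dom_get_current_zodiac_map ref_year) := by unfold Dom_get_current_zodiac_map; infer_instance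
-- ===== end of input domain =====

-- B replaces A's scatter loop over numbers 1..49 with a direct stride-12 arithmetic
-- progression per zodiac sign (objective: simpler; both are O(1)).

-- ===== PORT A =====
-- A's body after computing current_zodiac_idx: dict of empty lists, then the 1..49 loop.
def pvZodiacOrder : List String := ["鼠", "牛", "虎", "兔", "龍", "蛇", "馬", "羊", "猴", "雞", "狗", "豬"]

def get_current_zodiac_map_core (current_zodiac_idx : Int) : List (String × List Int) :=
  -- zodiac_map = {z: [] for z in zodiac_order}
  let zodiac_map : PySem.Dict String (List Int) :=
    pvZodiacOrder.foldl (fun d z => d.insert z []) PySem.Dict.empty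
  -- for num in range(1, 50): ... zodiac_map[zodiac_order[z_idx]].append(num)
  let zodiac_map :=
    (PySem.List.pyRange 1 50 1).foldl
      (fun d num =>
        let offset := PySem.Int.mod (num - 1) 12
        let z_idx := PySem.Int.mod (current_zodiac_idx - offset) 12
        -- zodiac_order[z_idx]: z_idx is always in range here, so pyGetD is exact
        d.modify (PySem.List.pyGetD pvZodiacOrder z_idx "") [] (fun l => l ++ [num]))
      zodiac_map
  zodiac_map.items

def get_current_zodiac_map (ref_year : Int) : List (String × List Int) :=
  let year := ref_year
  let base_year : Int := 2020
  let current_zodiac_idx := PySem.Int.mod (year - base_year) 12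
  get_current_zodiac_map_core current_zodiac_idx

-- ===== PORT B =====
def get_current_zodiac_map_alt_core (current_zodiac_idx : Int) : List (String × List Int) :=
  -- {zodiac_order[i]: list(range((c - i) % 12 + 1, 50, 12)) for i in range(12)}
  -- keys are the 12 distinct signs, so the dict comprehension IS this association list
  (PySem.List.pyRange 0 12 1).map
    (fun i =>
      (PySem.List.pyGetD pvZodiacOrder i "",
       PySem.List.pyRange (PySem.Int.mod (current_zodiac_idx - i) 12 + 1) 50 12))

def get_current_zodiac_map_alt (ref_year : Int) : List (String × List Int) :=
  let current_zodiac_idx := PySem.Int.mod (ref_year - 2020) 12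
  get_current_zodiac_map_alt_core current_zodiac_idx

-- ===== PRECONDITION & SPEC =====
def Spec_get_current_zodiac_map (ref_year : Int) (out : List (String × List Int)) : Prop := out = get_current_zodiac_map_alt ref_year
instance (ref_year : Int) (out : List (String × List Int)) : Decidable (Spec_get_current_zodiac_map ref_year out) := by unfold Spec_get_current_zodiac_map; infer_instance

-- ===== CLAIM (what is proved, stated in full; the proofs are below) =====
def Claim_equal_get_current_zodiac_map : Prop := ∀ (ref_year : Int), Dom_get_current_zodiac_map ref_year → Spec_get_current_zodiac_map ref_year (get_current_zodiac_map ref_year)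

-- ===== LEMMAS AND PROOFS =====

-- Both ports depend on ref_year only through c = (ref_year - 2020) % 12 ∈ [0, 12);
-- the cores agree on each of those 12 values.
set_option maxRecDepth 4000 in
lemma core_eq (c : Int) (h0 : 0 ≤ c) (h1 : c < 12) :
    get_current_zodiac_map_core c = get_current_zodiac_map_alt_core c := by
  interval_cases c <;> decide

lemma mod12_bounds (n : Int) : 0 ≤ PySem.Int.mod n 12 ∧ PySem.Int.mod n 12 < 12 := by
  unfold PySem.Int.mod
  rw [Int.fmod_eq_emod_of_nonneg n (by norm_num)]
  exact ⟨Int.emod_nonneg n (by norm_num), Int.emod_lt_of_pos n (by norm_num)⟩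

-- ===== VERDICT (by name: the statement is the Claim_ definition above) =====
theorem get_current_zodiac_map_spec : Claim_equal_get_current_zodiac_map := by
  intro ref_year _
  unfold Spec_get_current_zodiac_map get_current_zodiac_map get_current_zodiac_map_alt
  obtain ⟨h0, h1⟩ := mod12_bounds (ref_year - 2020)
  exact core_eq _ h0 h1
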